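-- pv_equiv track=rewrite | github.com/Sigmundmagic/myGit | PythonApplicationTaskNumberThird/PythonApplicationTaskNumberThird/amplicons.py | getArrayByPrimer
-- ===== SOURCE A (Python) =====
-- def getArrayByPrimer(primer):
--     result = []
--     table = [
--         ['A','A'],
--         ['G','G'],
--         ['T','T'],
--         ['C','C'],
--         ['R','A','G'],
--         ['Y','C','T'],
--         ['S','G','C'],
--         ['W','A','T'],
--         ['K','G','T'],
--         ['M','A','C'],
--         ['B','C','G','T'],
--         ['D','A','G','T'],
--         ['H','A','C','T'],
--         ['V','A','C','G'],
--         ['N','A','G','T','C']]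
--     for item in primer:
--         flag = False
--         for index in range(0,len(table)):
--             if table[index][0] == item:
--                 flag = True
--         if flag == False:
--             raise Exception('primer validation error in func ' + getArrayByPrimer)
--     for item in primer:
--         for index in range(0,len(table)):
--             if table[index][0] == item:
--                 tmpArr = []
--                 for i in range(1,len(table[index])):
--                     tmpArr.append(table[index][i])
--                 result.append(tmpArr)
--     return result
-- ===== SOURCE B (Python) =====
-- ROWS = [
--     ('A', ['A']), ('G', ['G']), ('T', ['T']), ('C', ['C']),
--     ('R', ['A', 'G']), ('Y', ['C', 'T']), ('S', ['G', 'C']), ('W', ['A', 'T']),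
--     ('K', ['G', 'T']), ('M', ['A', 'C']),
--     ('B', ['C', 'G', 'T']), ('D', ['A', 'G', 'T']), ('H', ['A', 'C', 'T']),
--     ('V', ['A', 'C', 'G']), ('N', ['A', 'G', 'T', 'C']),
-- ]
--
--
-- def getArrayByPrimer(primer):
--     # Table-major: walk the 15 rows once, dropping a fresh copy of the row's
--     # expansion into every primer position holding that row's letter; a slot
--     # left empty afterwards means an invalid character.
--     result = [None] * len(primer)
--     for head, expansion in ROWS:
--         result = [list(expansion) if ch == head else slot
--                   for ch, slot in zip(primer, result)]
--     if None in result: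
--         raise ValueError('primer validation error')
--     return result
-- ===== Notes on version B (the rewrite author's own statement) =====
-- stated objective: alternative
-- what changed: Transposes the loops: instead of A's two primer-major passes that each scan the 15-row table per character, B makes one table-major pass that assigns a fresh copy of each row's expansion into every primer position holding that letter, then validates by checking for unfilled slots.
import Mathlib
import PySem

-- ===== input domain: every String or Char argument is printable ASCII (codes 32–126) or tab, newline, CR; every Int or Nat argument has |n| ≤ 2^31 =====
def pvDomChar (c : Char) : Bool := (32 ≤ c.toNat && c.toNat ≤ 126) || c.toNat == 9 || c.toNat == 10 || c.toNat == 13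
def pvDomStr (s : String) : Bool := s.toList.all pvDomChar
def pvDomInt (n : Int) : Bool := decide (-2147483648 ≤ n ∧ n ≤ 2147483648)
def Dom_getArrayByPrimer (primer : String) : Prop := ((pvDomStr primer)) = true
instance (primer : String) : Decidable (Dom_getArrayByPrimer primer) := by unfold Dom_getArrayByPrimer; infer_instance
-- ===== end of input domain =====

-- B transposes A's loops: one table-major pass assigning expansions into a position-indexed
-- result instead of A's two primer-major table-scanning passes (alternative, same cost);
-- invalid characters (where both Pythons raise) are excluded by Pre_.


-- ===== PORT A =====
-- A's IUPAC table (each Python char literal is a one-char string)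
def pvTable : List (List String) :=
  [["A","A"], ["G","G"], ["T","T"], ["C","C"],
   ["R","A","G"], ["Y","C","T"], ["S","G","C"], ["W","A","T"], ["K","G","T"], ["M","A","C"],
   ["B","C","G","T"], ["D","A","G","T"], ["H","A","C","T"], ["V","A","C","G"],
   ["N","A","G","T","C"]]

-- A's validation pass raises outside Pre_; the mapping pass: for each primer char, scan the
-- table, and on a head match build tmpArr by appending table[index][i] for i in range(1, len).
def getArrayByPrimer (primer : String) : List (List String) :=
  primer.toList.foldl (fun result item =>
    pvTable.foldl (fun res row =>
      if PySem.List.pyGetD row 0 "" = String.ofList [item] then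
        res ++ [(PySem.List.pyRange 1 (PySem.List.len row) 1).foldl
                  (fun tmpArr i => tmpArr ++ [PySem.List.pyGetD row i ""]) []]
      else res) result) []

-- ===== PORT B =====
-- B's ROWS: (head letter, expansion list) pairs
def pvRows : List (String × List String) :=
  [("A", ["A"]), ("G", ["G"]), ("T", ["T"]), ("C", ["C"]),
   ("R", ["A","G"]), ("Y", ["C","T"]), ("S", ["G","C"]), ("W", ["A","T"]),
   ("K", ["G","T"]), ("M", ["A","C"]),
   ("B", ["C","G","T"]), ("D", ["A","G","T"]), ("H", ["A","C","T"]), ("V", ["A","C","G"]),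
   ("N", ["A","G","T","C"])]

-- B: result starts as [None]*len(primer); each table row overwrites the slots of its letter
-- (the zip comprehension is the zipWith below); 'None in result' raises outside Pre_, so the
-- final extraction uses getD (the default is unreached inside Pre_).
def getArrayByPrimer_alt (primer : String) : List (List String) :=
  let init : List (Option (List String)) := primer.toList.map (fun _ => none)
  let filled := pvRows.foldl (fun res row =>
      List.zipWith (fun ch slot =>
        if String.ofList [ch] = row.1 then some row.2 else slot) primer.toList res) init
  filled.map (fun slot => slot.getD [])

-- ===== PRECONDITION & SPEC =====
-- A raises on any char outside the 15-letter IUPAC alphabet (B raises too); exactly those are excluded.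
def Pre_getArrayByPrimer (primer : String) : Prop :=
  (primer.toList.all (fun c =>
    (['A','G','T','C','R','Y','S','W','K','M','B','D','H','V','N'] : List Char).contains c)) = true
instance (primer : String) : Decidable (Pre_getArrayByPrimer primer) := by
  unfold Pre_getArrayByPrimer; infer_instance

def pvWitness_getArrayByPrimer : String := "ACNRT"

def Spec_getArrayByPrimer (primer : String) (out : List (List String)) : Prop := out = getArrayByPrimer_alt primer
instance (primer : String) (out : List (List String)) : Decidable (Spec_getArrayByPrimer primer out) := by unfold Spec_getArrayByPrimer; infer_instance

-- ===== CLAIM (what is proved, stated in full; the proofs are below) =====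
def Claim_equal_getArrayByPrimer : Prop := ∀ (primer : String), Dom_getArrayByPrimer primer → Pre_getArrayByPrimer primer → Spec_getArrayByPrimer primer (getArrayByPrimer primer)

-- ===== LEMMAS AND PROOFS =====

-- the per-character value A's inner table scan produces (inner fold starting from [])
def pvScan (item : Char) : List (List String) :=
  pvTable.foldl (fun res row =>
    if PySem.List.pyGetD row 0 "" = String.ofList [item] then
      res ++ [(PySem.List.pyRange 1 (PySem.List.len row) 1).foldl
                (fun tmpArr i => tmpArr ++ [PySem.List.pyGetD row i ""]) []]
    else res) []

-- the slot B's table-major fold ends with at a position holding character c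
def pvSlot (c : Char) : Option (List String) :=
  pvRows.foldl (fun slot row =>
    if String.ofList [c] = row.1 then some row.2 else slot) none

-- A's inner scan is accumulator-independent (a fold that only ever appends)
lemma pvScan_acc_gen (item : Char) (l : List (List String)) (res : List (List String)) :
    l.foldl (fun res row =>
      if PySem.List.pyGetD row 0 "" = String.ofList [item] then
        res ++ [(PySem.List.pyRange 1 (PySem.List.len row) 1).foldl
                  (fun tmpArr i => tmpArr ++ [PySem.List.pyGetD row i ""]) []]
      else res) res
    = res ++ l.foldl (fun res row =>
      if PySem.List.pyGetD row 0 "" = String.ofList [item] then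
        res ++ [(PySem.List.pyRange 1 (PySem.List.len row) 1).foldl
                  (fun tmpArr i => tmpArr ++ [PySem.List.pyGetD row i ""]) []]
      else res) [] := by
  induction l generalizing res with
  | nil => simp
  | cons row l ih =>
    simp only [List.foldl_cons]
    rw [ih]
    conv_rhs => rw [ih]
    split_ifs <;> simp

-- A's outer loop is a flatMap of the per-character scans
lemma pvA_eq_flatMap (cs : List Char) :
    cs.foldl (fun result item =>
      pvTable.foldl (fun res row =>
        if PySem.List.pyGetD row 0 "" = String.ofList [item] then
          res ++ [(PySem.List.pyRange 1 (PySem.List.len row) 1).foldl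
                    (fun tmpArr i => tmpArr ++ [PySem.List.pyGetD row i ""]) []]
        else res) result) [] = cs.flatMap pvScan := by
  have h : ∀ (acc : List (List String)),
      cs.foldl (fun result item =>
        pvTable.foldl (fun res row =>
          if PySem.List.pyGetD row 0 "" = String.ofList [item] then
            res ++ [(PySem.List.pyRange 1 (PySem.List.len row) 1).foldl
                      (fun tmpArr i => tmpArr ++ [PySem.List.pyGetD row i ""]) []]
          else res) result) acc = acc ++ cs.flatMap pvScan := by
    induction cs with
    | nil => simp
    | cons c cs ih =>
      intro acc
      simp only [List.foldl_cons, List.flatMap_cons]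
      rw [pvScan_acc_gen, ih, List.append_assoc]
      rfl
  simpa using h []

-- zipping a list with a map over itself is a pointwise map
lemma pvZipWith_map_self {α β γ : Type} (f : α → β → γ) (g : α → β) (cs : List α) :
    List.zipWith f cs (cs.map g) = cs.map (fun c => f c (g c)) := by
  induction cs with
  | nil => rfl
  | cons c cs ih => simp [ih]

-- B's table-major fold acts pointwise on any pointwise-defined state
lemma pvB_pointwise_gen (rows : List (String × List String)) (cs : List Char)
    (g : Char → Option (List String)) :
    rows.foldl (fun res row =>
      List.zipWith (fun ch slot =>
        if String.ofList [ch] = row.1 then some row.2 else slot) cs res)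
      (cs.map g)
    = cs.map (fun c => rows.foldl (fun slot row =>
        if String.ofList [c] = row.1 then some row.2 else slot) (g c)) := by
  induction rows generalizing g with
  | nil => simp
  | cons row rows ih =>
    simp only [List.foldl_cons, pvZipWith_map_self]
    exact ih _

-- B's table-major fold is the map of the per-slot fold
lemma pvB_pointwise (cs : List Char) :
    pvRows.foldl (fun res row =>
      List.zipWith (fun ch slot =>
        if String.ofList [ch] = row.1 then some row.2 else slot) cs res)
      (cs.map (fun _ => none))
    = cs.map pvSlot := pvB_pointwise_gen pvRows cs (fun _ => none)

-- per valid character: A's scan is the singleton of B's final slot value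
lemma pvScan_eq_slot (c : Char)
    (hc : c ∈ (['A','G','T','C','R','Y','S','W','K','M','B','D','H','V','N'] : List Char)) :
    pvScan c = [(pvSlot c).getD []] := by
  fin_cases hc <;> decide

-- on an all-valid char list the flatMap of scans is the map of slot values
lemma pvFlatMap_eq_map (cs : List Char)
    (h : ∀ c ∈ cs, c ∈ (['A','G','T','C','R','Y','S','W','K','M','B','D','H','V','N'] : List Char)) :
    cs.flatMap pvScan = cs.map (fun c => (pvSlot c).getD []) := by
  induction cs with
  | nil => rfl
  | cons c cs ih =>
    simp only [List.flatMap_cons, List.map_cons]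
    rw [pvScan_eq_slot c (h c (List.mem_cons_self ..)),
        ih (fun x hx => h x (List.mem_cons_of_mem _ hx))]
    rfl

-- ===== VERDICT (by name: the statement is the Claim_ definition above) =====
theorem getArrayByPrimer_spec : Claim_equal_getArrayByPrimer := by
  intro primer _ hpre
  unfold Spec_getArrayByPrimer getArrayByPrimer getArrayByPrimer_alt
  rw [pvA_eq_flatMap]
  show _ = (pvRows.foldl _ (primer.toList.map fun _ => none)).map _
  rw [pvB_pointwise, List.map_map]
  refine pvFlatMap_eq_map primer.toList (fun c hc => ?_)
  have := List.all_eq_true.mp hpre c hc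
  simpa using this
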